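-- pv_equiv track=rewrite | github.com/wilmurillo-ai/Design-Assistant | .skills/openclaw-skills/skills/tankeito/server-mate/scripts/server_agent.py | quote_systemd_value
-- ===== SOURCE A (Python) =====
-- def quote_systemd_value(value: str) -> str:
--     text = str(value)
--     if not text:
--         return '""'
--     if any(char.isspace() for char in text) or any(char in text for char in ('"', "\\")):
--         escaped = text.replace("\\", "\\\\").replace('"', '\\"')
--         return f'"{escaped}"'
--     return text
-- ===== SOURCE B (Python) =====
-- def quote_systemd_value(value: str) -> str:
--     text = str(value)
--     if not text:
--         return '""'
--     needs_quote = False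
--     parts = []
--     for ch in text:
--         if ch.isspace() or ch == '"' or ch == '\\':
--             needs_quote = True
--         if ch == '\\':
--             parts.append('\\\\')
--         elif ch == '"':
--             parts.append('\\"')
--         else:
--             parts.append(ch)
--     if needs_quote:
--         return '"' + ''.join(parts) + '"'
--     return text
-- ===== Notes on version B (the rewrite author's own statement) =====
-- stated objective: alternative
-- what changed: Replaces A's two any-scans plus two chained .replace passes with a single character loop that computes the needs-quote flag and builds the escaped text in one pass.
import Mathlib
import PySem

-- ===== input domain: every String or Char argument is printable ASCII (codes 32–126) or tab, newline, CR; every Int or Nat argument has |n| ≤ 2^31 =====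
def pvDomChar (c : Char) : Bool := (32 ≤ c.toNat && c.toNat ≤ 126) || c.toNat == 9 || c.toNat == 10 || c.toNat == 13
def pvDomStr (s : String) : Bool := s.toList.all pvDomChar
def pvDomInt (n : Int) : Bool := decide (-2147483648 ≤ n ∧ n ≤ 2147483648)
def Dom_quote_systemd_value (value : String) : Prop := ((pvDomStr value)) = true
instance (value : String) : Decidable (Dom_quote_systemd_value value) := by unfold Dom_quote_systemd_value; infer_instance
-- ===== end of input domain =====

-- B fuses A's two any-scans and two chained .replace passes into one loop computing
-- the needs-quote flag and the escaped text together (objective: alternative, same O(n) cost).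

-- ===== PORT A =====
def quote_systemd_value (value : String) : String :=
  let text := value          -- str(value) on a str is the string itself
  if text.toList.isEmpty then "\"\"" else
  if text.toList.any PySem.Chars.isspace
      || (PySem.Chars.isIn ['"'] text.toList || PySem.Chars.isIn ['\\'] text.toList) then
    let escaped := PySem.Chars.replace (PySem.Chars.replace text.toList ['\\'] ['\\', '\\']) ['"'] ['\\', '"']
    String.mk ('"' :: escaped ++ ['"'])
  else text

-- ===== PORT B =====
def pvEscChar (c : Char) : List Char :=
  if c = '\\' then ['\\', '\\'] else if c = '"' then ['\\', '"'] else [c]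

def quote_systemd_value_alt (value : String) : String :=
  let text := value
  if text.toList.isEmpty then "\"\"" else
  let st := text.toList.foldl
      (fun (st : Bool × List Char) c =>
        (st.1 || (PySem.Chars.isspace c || c == '"' || c == '\\'), st.2 ++ pvEscChar c))
      (false, [])
  if st.1 then String.mk ('"' :: st.2 ++ ['"']) else text

-- ===== PRECONDITION & SPEC =====
def Spec_quote_systemd_value (value : String) (out : String) : Prop := out = quote_systemd_value_alt value
instance (value : String) (out : String) : Decidable (Spec_quote_systemd_value value out) := by unfold Spec_quote_systemd_value; infer_instance

-- ===== CLAIM (what is proved, stated in full; the proofs are below) =====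
def Claim_equal_quote_systemd_value : Prop := ∀ (value : String), Dom_quote_systemd_value value → Spec_quote_systemd_value value (quote_systemd_value value)

-- ===== LEMMAS AND PROOFS =====

-- B's fold, characterised.
theorem pv_foldl_char (l : List Char) : ∀ (b : Bool) (acc : List Char),
    l.foldl (fun (st : Bool × List Char) c =>
        (st.1 || (PySem.Chars.isspace c || c == '"' || c == '\\'), st.2 ++ pvEscChar c)) (b, acc)
      = (b || l.any (fun c => PySem.Chars.isspace c || c == '"' || c == '\\'),
         acc ++ l.flatMap pvEscChar) := by
  induction l with
  | nil => simp
  | cons c t ih =>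
      intro b acc
      simp only [List.foldl_cons]
      rw [ih]
      simp [List.any_cons, Bool.or_assoc, List.append_assoc]

-- `char in text` for a single-character needle is list membership.
theorem pv_isIn_singleton (a : Char) (l : List Char) :
    PySem.Chars.isIn [a] l = l.any (· == a) := by
  rcases h : l.any (· == a) with _ | _
  · rw [PySem.Chars.isIn_eq_false_iff]
    intro hinf
    have : a ∈ l := (List.singleton_sublist).1 hinf.sublist
    simp at h
    exact h a this rfl
  · rw [PySem.Chars.isIn_iff_infix]
    have hm : a ∈ l := by simpa using h
    obtain ⟨s, t, rfl⟩ := List.append_of_mem hm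
    exact ⟨s, t, by simp⟩

-- single-char replace is a flatMap
theorem pv_replace_go_single (a : Char) (new : List Char) :
    ∀ (fuel : Nat) (l acc : List Char), l.length ≤ fuel →
    PySem.Chars.replace.go [a] new fuel l acc
      = acc.reverse ++ l.flatMap (fun c => if c = a then new else [c]) := by
  intro fuel
  induction fuel with
  | zero =>
      intro l acc h
      have : l = [] := List.length_eq_zero_iff.1 (Nat.le_zero.1 h)
      subst this
      simp [PySem.Chars.replace.go]
  | succ n ih =>
      intro l acc h
      cases l with
      | nil => simp [PySem.Chars.replace.go]
      | cons c t =>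
          rw [PySem.Chars.replace.go]
          by_cases hc : c = a
          · subst hc
            simp only [List.isPrefixOf_cons₂, List.isPrefixOf_nil_left, beq_self_eq_true,
              Bool.and_self, if_pos]
            rw [ih _ _ (by simpa using Nat.le_of_succ_le_succ h)]
            simp
          · have : List.isPrefixOf [a] (c :: t) = false := by
              simp [List.isPrefixOf_cons₂]
              exact fun h' => absurd h'.symm hc
            rw [this]
            simp only [Bool.false_eq_true, if_false]
            rw [ih _ _ (by simpa using Nat.le_of_succ_le_succ h)]
            simp [hc]

theorem pv_replace_single (a : Char) (new : List Char) (l : List Char) :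
    PySem.Chars.replace l [a] new = l.flatMap (fun c => if c = a then new else [c]) := by
  rw [PySem.Chars.replace]
  simp only [List.isEmpty_cons, Bool.false_eq_true, if_false]
  simpa using pv_replace_go_single a new l.length l [] le_rfl

theorem pv_escaped_eq (l : List Char) :
    PySem.Chars.replace (PySem.Chars.replace l ['\\'] ['\\', '\\']) ['"'] ['\\', '"']
      = l.flatMap pvEscChar := by
  rw [pv_replace_single, pv_replace_single]
  induction l with
  | nil => simp
  | cons c t ih =>
      simp only [List.flatMap_cons, List.flatMap_append, ih]
      congr 1
      by_cases h1 : c = '\\'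
      · subst h1; simp [pvEscChar]
      · by_cases h2 : c = '"'
        · subst h2; simp [pvEscChar]
        · simp [pvEscChar, h1, h2]

theorem pv_cond_eq (l : List Char) :
    (l.any PySem.Chars.isspace || (PySem.Chars.isIn ['"'] l || PySem.Chars.isIn ['\\'] l))
      = l.any (fun c => PySem.Chars.isspace c || c == '"' || c == '\\') := by
  rw [pv_isIn_singleton, pv_isIn_singleton]
  induction l with
  | nil => simp
  | cons c t ih =>
      simp only [List.any_cons, ← ih]
      cases PySem.Chars.isspace c <;> cases c == '"' <;> cases c == '\\' <;>
        cases t.any PySem.Chars.isspace <;> cases t.any (· == '"') <;> cases t.any (· == '\\') <;>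
          simp

-- ===== VERDICT (by name: the statement is the Claim_ definition above) =====
theorem quote_systemd_value_spec : Claim_equal_quote_systemd_value := by
  intro value _
  unfold Spec_quote_systemd_value quote_systemd_value quote_systemd_value_alt
  simp only [pv_foldl_char, pv_cond_eq, pv_escaped_eq, List.nil_append, Bool.false_or]
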